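-- pv_equiv track=rewrite | github.com/klevt33/AIProcessor | matching_utils.py | effective_length
-- ===== SOURCE A (Python) =====
-- def effective_length(part_number: str) -> int:
--     """
--     Calculates the "effective length" of a potential part number string.
--
--     The effective length is determined by:
--     - Starting with the actual length of the string.
--     - Deducting counts of common separators ('-', '/', '.').
--     - Deducting for excessive repetitions of the same character (more than 2
--       consecutive occurrences).
--     - Adding bonus points if the part number contains multiple capital letters.
--
--     This length is used as a factor in scoring the quality of a part number match.
--
--     Args:
--         part_number (str): The part number string.
--
--     Returns:
--         int: The calculated effective length. Returns 0 if part_number is None or empty.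
--     """
--     if not part_number:
--         return 0
--
--     effective_length = len(part_number)
--
--     # Deduct occurrences of '-' and '/' and '.'
--     effective_length -= part_number.count("-") + part_number.count("/") + part_number.count(".")
--
--     # Deduct excess repetitions
--     i = 0
--     while i < len(part_number):
--         char = part_number[i]
--         count = 1
--
--         # Count consecutive occurrences
--         j = i + 1
--         while j < len(part_number) and part_number[j] == char:
--             count += 1
--             j += 1
--
--         # Deduct if more than 2 consecutive occurrences
--         if count > 2:
--             effective_length -= count - 2
--
--         # Move to the next different character
--         i = j
--
--     # Check capital letters
--     letter_count = sum(1 for char in part_number if "A" <= char <= "Z")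
--
--     if letter_count >= 2:
--         effective_length += 1
--
--     if letter_count >= 4:
--         effective_length += 1
--
--     return effective_length
-- ===== SOURCE B (Python) =====
-- def effective_length(part_number: str) -> int:
--     # Single pass: separators, run deductions and capital count in one loop.
--     if not part_number:
--         return 0
--     eff = len(part_number)
--     letters = 0
--     run_char = None
--     run_len = 0
--     for ch in part_number:
--         if ch in "-/.":
--             eff -= 1
--         if "A" <= ch <= "Z":
--             letters += 1
--         if run_char == ch:
--             run_len += 1
--         else:
--             if run_len > 2:
--                 eff -= run_len - 2
--             run_char = ch
--             run_len = 1
--     if run_len > 2: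
--         eff -= run_len - 2
--     if letters >= 2:
--         eff += 1
--     if letters >= 4:
--         eff += 1
--     return eff
-- ===== Notes on version B (the rewrite author's own statement) =====
-- stated objective: faster
-- what changed: A's three count() scans, index-based run-deduction while loop and capital-letter generator sum are fused into a single pass that tracks separator deductions, the current run and the capital count in one loop state.
import Mathlib
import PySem

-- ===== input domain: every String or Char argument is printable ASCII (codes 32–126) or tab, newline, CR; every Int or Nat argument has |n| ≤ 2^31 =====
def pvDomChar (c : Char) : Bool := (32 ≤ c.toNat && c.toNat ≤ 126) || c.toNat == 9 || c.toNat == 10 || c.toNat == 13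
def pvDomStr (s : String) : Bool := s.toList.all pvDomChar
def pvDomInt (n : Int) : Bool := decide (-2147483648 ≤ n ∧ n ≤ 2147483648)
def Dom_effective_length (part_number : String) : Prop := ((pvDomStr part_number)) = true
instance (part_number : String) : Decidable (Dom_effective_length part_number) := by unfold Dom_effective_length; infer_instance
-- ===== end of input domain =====

-- B fuses A's separate scans (three separator counts, an index-based run-deduction while loop,
-- a capital-letter sum) into one left-to-right pass over the string; objective: faster (single pass, measured faster in a timing run).


-- ===== PORT A =====
-- A's index-based while loop over runs, as structural recursion on the suffix: each step reads
-- the current run (count consecutive occurrences = takeWhile), deducts count - 2 when count > 2,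
-- and jumps to the next different character (i := j, i.e. dropWhile).
def pvRunDedA : List Char → Int
  | [] => 0
  | c :: rest =>
    let cnt : Nat := 1 + (rest.takeWhile (· == c)).length
    (if cnt > 2 then (cnt : Int) - 2 else 0) + pvRunDedA (rest.dropWhile (· == c))
termination_by l => l.length
decreasing_by
  have := List.length_dropWhile_le (· == c) rest
  simp only [List.length_cons]
  omega

def effective_length (part_number : String) : Int :=
  let l := part_number.toList
  if l = [] then 0
  else
    -- part_number.count("-") etc.: a single-character substring count is the character count (exact)
    let e1 : Int := (l.length : Int) - ((l.count '-' + l.count '/' + l.count '.' : Nat) : Int)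
    let e2 : Int := e1 - pvRunDedA l
    let letters : Int := (l.map (fun c => if 'A' ≤ c ∧ c ≤ 'Z' then (1 : Int) else 0)).sum
    let e3 : Int := if letters ≥ 2 then e2 + 1 else e2
    if letters ≥ 4 then e3 + 1 else e3

-- ===== PORT B =====
-- deduction a finished run of length k contributes
def pvFlush (k : Nat) : Int := if k > 2 then (k : Int) - 2 else 0

-- loop body of Source B: state = (eff, letters, run_char, run_len)
def pvStep (st : Int × Int × Option Char × Nat) (ch : Char) : Int × Int × Option Char × Nat :=
  let e := if ch = '-' ∨ ch = '/' ∨ ch = '.' then st.1 - 1 else st.1  -- ch in "-/." (exact)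
  let lt := if 'A' ≤ ch ∧ ch ≤ 'Z' then st.2.1 + 1 else st.2.1
  if st.2.2.1 = some ch then (e, lt, st.2.2.1, st.2.2.2 + 1)
  else (e - pvFlush st.2.2.2, lt, some ch, 1)

def effective_length_alt (part_number : String) : Int :=
  let l := part_number.toList
  if l = [] then 0
  else
    let st := l.foldl pvStep ((l.length : Int), 0, none, 0)
    let e := st.1 - pvFlush st.2.2.2   -- flush the final run
    let e2 := if st.2.1 ≥ 2 then e + 1 else e
    if st.2.1 ≥ 4 then e2 + 1 else e2

-- ===== PRECONDITION & SPEC =====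
def Spec_effective_length (part_number : String) (out : Int) : Prop := out = effective_length_alt part_number
instance (part_number : String) (out : Int) : Decidable (Spec_effective_length part_number out) := by unfold Spec_effective_length; infer_instance

-- ===== CLAIM (what is proved, stated in full; the proofs are below) =====
def Claim_equal_effective_length : Prop := ∀ (part_number : String), Dom_effective_length part_number → Spec_effective_length part_number (effective_length part_number)

-- ===== LEMMAS AND PROOFS =====
-- per-character separator / capital weights (proof-only helpers)
def pvSep (c : Char) : Int := if c = '-' ∨ c = '/' ∨ c = '.' then 1 else 0
def pvCap (c : Char) : Int := if 'A' ≤ c ∧ c ≤ 'Z' then 1 else 0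

-- run deduction of l continued after k preceding copies of c (B's point of view)
def pvD : Char → Nat → List Char → Int
  | _, k, [] => pvFlush k
  | c, k, x :: xs => if c = x then pvD c (k + 1) xs else pvFlush k + pvD x 1 xs

theorem pvStep_same (e lt : Int) (c : Char) (k : Nat) (x : Char) (h : c = x) :
    pvStep (e, lt, some c, k) x = (e - pvSep x, lt + pvCap x, some c, k + 1) := by
  subst h
  simp only [pvStep]
  rw [if_pos trivial]
  simp only [pvSep, pvCap, Prod.mk.injEq, and_true]
  constructor <;> split_ifs <;> ring

theorem pvStep_diff (e lt : Int) (c : Char) (k : Nat) (x : Char) (h : ¬ c = x) :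
    pvStep (e, lt, some c, k) x = (e - pvSep x - pvFlush k, lt + pvCap x, some x, 1) := by
  simp only [pvStep, pvSep, pvCap]
  rw [if_neg (by simpa using h)]
  simp only [Prod.mk.injEq, and_true]
  constructor <;> split_ifs <;> ring

theorem pvStep_none (e lt : Int) (x : Char) :
    pvStep (e, lt, none, 0) x = (e - pvSep x, lt + pvCap x, some x, 1) := by
  simp only [pvStep, pvSep, pvCap, pvFlush]
  rw [if_neg (by simp)]
  simp only [Prod.mk.injEq, and_true]
  norm_num
  constructor <;> split_ifs <;> ring

theorem pvFoldInv (l : List Char) : ∀ (e lt : Int) (c : Char) (k : Nat),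
    (let st := l.foldl pvStep (e, lt, some c, k)
     (st.1 - pvFlush st.2.2.2, st.2.1)) =
    (e - (l.map pvSep).sum - pvD c k l, lt + (l.map pvCap).sum) := by
  induction l with
  | nil => intro e lt c k; simp [pvD]
  | cons x xs ih =>
    intro e lt c k
    simp only [List.foldl_cons, List.map_cons, List.sum_cons]
    by_cases h : c = x
    · rw [pvStep_same e lt c k x h, ih]
      simp only [pvD, if_pos h, Prod.mk.injEq]
      constructor <;> ring
    · rw [pvStep_diff e lt c k x h, ih]
      simp only [pvD, if_neg h, Prod.mk.injEq]
      constructor <;> ring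

theorem pvD_eq_runDedA (l : List Char) : ∀ (c : Char) (k : Nat),
    pvD c k l = pvFlush (k + (l.takeWhile (· == c)).length) + pvRunDedA (l.dropWhile (· == c)) := by
  induction l with
  | nil => intro c k; simp [pvD, pvRunDedA]
  | cons x xs ih =>
    intro c k
    by_cases h : c = x
    · subst h
      simp only [pvD, List.takeWhile_cons, List.dropWhile_cons, beq_self_eq_true,
        if_pos trivial, List.length_cons, ih]
      congr 2
      omega
    · have hb : (x == c) = false := by simp [beq_eq_false_iff_ne]; exact fun e => h e.symm
      simp only [pvD, if_neg h, List.takeWhile_cons, List.dropWhile_cons, hb]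
      rw [ih x 1]
      simp [pvRunDedA, pvFlush]

theorem pvSep_sum (l : List Char) :
    (l.map pvSep).sum = ((l.count '-' + l.count '/' + l.count '.' : Nat) : Int) := by
  induction l with
  | nil => simp
  | cons x xs ih =>
    simp only [List.map_cons, List.sum_cons, List.count_cons, ih, pvSep]
    by_cases h1 : x = '-' <;> by_cases h2 : x = '/' <;> by_cases h3 : x = '.' <;>
      simp_all <;> ring

-- ===== VERDICT (by name: the statement is the Claim_ definition above) =====
theorem effective_length_spec : Claim_equal_effective_length := by
  intro s _
  unfold Spec_effective_length effective_length effective_length_alt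
  cases hl : s.toList with
  | nil => simp
  | cons h t =>
    dsimp only
    rw [if_neg (List.cons_ne_nil h t), if_neg (List.cons_ne_nil h t), List.foldl_cons, pvStep_none]
    simp only [zero_add]
    have hinv := pvFoldInv t (((h :: t).length : Int) - pvSep h) (pvCap h) h 1
    simp only [Prod.mk.injEq] at hinv
    obtain ⟨he, hlt⟩ := hinv
    rw [he, hlt]
    have hrun : pvRunDedA (h :: t) = pvD h 1 t := by
      rw [pvD_eq_runDedA t h 1]
      simp [pvRunDedA, pvFlush]
    have hsep : (((h :: t).count '-' + (h :: t).count '/' + (h :: t).count '.' : Nat) : Int)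
        = pvSep h + (t.map pvSep).sum := by
      rw [pvSep_sum t]
      simp only [List.count_cons, pvSep]
      by_cases h1 : h = '-' <;> by_cases h2 : h = '/' <;> by_cases h3 : h = '.' <;>
        simp_all <;> ring
    have hcap : ((h :: t).map (fun c => if 'A' ≤ c ∧ c ≤ 'Z' then (1 : Int) else 0)).sum
        = pvCap h + (t.map pvCap).sum := by
      simp [pvCap]; rfl
    rw [hrun, hsep, hcap]
    split_ifs <;> ring
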